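-- pv_equiv track=rewrite | github.com/tergeorge/Scripts | python_files/Q1.py | shift_vowels
-- ===== SOURCE A (Python) =====
-- def count_repetition(s, i):
--     # counts the number of consecutive chars starting at index i, ignoring
--     # uppercase/lowercase
--     count = 1
--     for j in range(i, len(s)-1):
--         if(s[j].lower() == s[j+1].lower()):
--             count += 1
--         else:
--             return count
--     return count
--
-- def changeLetterCase(letter, toUpper):
--     # changes letter to lowercase or uppercase
--     # changeLetterCase('a', True) => 'A'
--     # changeLetterCase('A', False) => a'
--     if toUpper:
--         return letter.upper()
--     return letter.lower()
--
-- def shift_vowels(s):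
--     vowels = ["a", "e", "i", "o", "u"] # Initialize list of vowels
--     size = len(vowels) # find length of vowels array
--
--     new_word = "" # Initialize empty string for storing the new word
--     j = 0
--
--     while(j < len(s)): # run while loop till its less than size of string entered
--
--         letter = s[j].lower()
--         isUpperCase = s[j].isupper()
--
--         if letter in vowels: # Check if letter is found in vowels array
--         # get position of current vowel in `vowels`
--             i = vowels.index(letter)
--
--             # count number of consecutive letters
--             steps = count_repetition(s, j)
--
--             # get replacement vowel
--             new_vowel = vowels[(steps+i+1) % size]
--
--             # update consecutive vowels taking into consideration
--             # uppercase/lowercase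
--             for step in range(0, steps):
--                 isUpperCase = s[j].isupper()
--
--                 new_word += changeLetterCase(
--                     new_vowel, isUpperCase)
--                 j += 1
--
--         else:
--             new_word += changeLetterCase(letter, isUpperCase) # if letter is not a vowel , do not replace it
--             j += 1
--
--
--     return new_word # return new word
-- ===== SOURCE B (Python) =====
-- def shift_vowels(s):
--     vowels = "aeiou"
--     low = s.lower()
--     n = len(s)
--     # pass 1 (back to front): suffix[i] = run length of equal letters starting at i
--     suffix = [1] * n
--     for i in range(n - 2, -1, -1):
--         if low[i] == low[i + 1]:
--             suffix[i] = suffix[i + 1] + 1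
--     # pass 2 (front to back): runlen[i] = total length of the run containing i
--     runlen = list(suffix)
--     for i in range(1, n):
--         if low[i] == low[i - 1]:
--             runlen[i] = runlen[i - 1]
--     # pass 3: map each character independently using the table
--     out = []
--     for c, lc, L in zip(s, low, runlen):
--         if lc in vowels:
--             lc = vowels[(L + vowels.index(lc) + 1) % 5]
--         out.append(lc.upper() if c.isupper() else lc)
--     return ''.join(out)
-- ===== Notes on version B (the rewrite author's own statement) =====
-- stated objective: alternative
-- what changed: B replaces A's single index-stepping while-loop with per-position count_repetition rescans by three staged array passes: a backward pass building a suffix run-length table, a forward pass turning it into a total-run-length table, and a final independent per-character map over zip(s, low, runlen).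
import Mathlib
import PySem

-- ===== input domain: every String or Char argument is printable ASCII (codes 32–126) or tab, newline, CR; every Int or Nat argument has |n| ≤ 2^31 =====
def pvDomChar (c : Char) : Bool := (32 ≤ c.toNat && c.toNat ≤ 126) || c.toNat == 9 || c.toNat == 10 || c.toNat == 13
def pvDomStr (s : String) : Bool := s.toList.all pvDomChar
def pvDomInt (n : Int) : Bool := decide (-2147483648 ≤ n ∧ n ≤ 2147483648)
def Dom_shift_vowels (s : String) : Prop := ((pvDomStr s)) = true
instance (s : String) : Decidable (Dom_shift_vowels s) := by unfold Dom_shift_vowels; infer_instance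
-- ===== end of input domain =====

-- B replaces A's index-stepping while-loop (with its per-position counting rescans) by three staged
-- passes: a backward suffix-run-length table, a forward run-total table, then an independent
-- per-character map (alternative decomposition; same O(n) cost).


-- the vowel table both Pythons write as a literal
def pvVowels : List Char := ['a', 'e', 'i', 'o', 'u']

-- ===== PORT A =====

-- termination measures for the ports' loops (cited by name in decreasing_by)
theorem pvDecSub1 {len j : Nat} (h : j < len - 1) : len - (j + 1) < len - j := by omega

theorem pvDecSucc {len j : Nat} (h : j < len) : len - (j + 1) < len - j := by omega

theorem pvDecStep {len j st : Nat} (hj : j < len) (hs : 1 ≤ st) :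
    len - (j + st) < len - j := by omega

-- the for-loop of count_repetition (early return on the first mismatch)
def crLoop (s : List Char) (j : Nat) (count : Nat) : Nat :=
  if h : j < s.length - 1 then
    if PySem.Chars.lowerChar (s.getD j ' ') == PySem.Chars.lowerChar (s.getD (j + 1) ' ') then
      crLoop s (j + 1) (count + 1)
    else count
  else count
termination_by s.length - j
decreasing_by exact pvDecSub1 h

def count_repetition (s : List Char) (i : Nat) : Nat := crLoop s i 1

def changeLetterCase (letter : Char) (toUpper : Bool) : Char :=
  if toUpper then PySem.Chars.upperChar letter else PySem.Chars.lowerChar letter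

-- needed by loopA's termination: the counting loop never returns less than its accumulator
theorem crLoop_ge (s : List Char) (j count : Nat) : count ≤ crLoop s j count := by
  unfold crLoop
  split
  · split
    · exact Nat.le_trans (Nat.le_succ _) (crLoop_ge s (j + 1) (count + 1))
    · exact Nat.le_refl _
  · exact Nat.le_refl _
termination_by s.length - j
decreasing_by omega

-- the inner 'for step in range(0, steps)' loop of A
def emitLoop (s : List Char) (j : Nat) (steps : Nat) (nv : Char) (acc : List Char) : List Char :=
  match steps with
  | 0 => acc
  | st + 1 =>
      emitLoop s (j + 1) st nv
        (acc ++ [changeLetterCase nv (PySem.Chars.isupper (s.getD j ' '))])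

-- the outer while-loop of A
def loopA (s : List Char) (j : Nat) (acc : List Char) : List Char :=
  if h : j < s.length then
    let letter := PySem.Chars.lowerChar (s.getD j ' ')
    if letter ∈ pvVowels then
      let i := pvVowels.idxOf letter
      let steps := count_repetition s j
      let nv := pvVowels.getD ((steps + i + 1) % 5) ' '
      loopA s (j + steps) (emitLoop s j steps nv acc)
    else
      loopA s (j + 1) (acc ++ [changeLetterCase letter (PySem.Chars.isupper (s.getD j ' '))])
  else acc
termination_by s.length - j
decreasing_by
  · exact pvDecStep h (crLoop_ge s j 1)
  · exact pvDecSucc h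

def shift_vowels (s : String) : String := String.mk (loopA s.toList 0 [])

-- ===== PORT B =====

-- pass 1 of Source B: the backward loop building suffix[i] = 1 + (suffix[i+1] if low[i]==low[i+1]);
-- transcribed as structural recursion from the right over the (already lowered) character list
def sufList : List Char → List Nat
  | [] => []
  | [_] => [1]
  | c :: d :: t =>
      let rest := sufList (d :: t)
      (if c == d then rest.headD 1 + 1 else 1) :: rest

-- pass 2 of Source B, after its first element: carries (previous lowered char p, previous runlen pr)
def runAux : List Char → List Nat → Char → Nat → List Nat
  | [], _, _, _ => []
  | c :: rest, sf :: sfs, p, pr =>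
      let r := if c == p then pr else sf
      r :: runAux rest sfs c r
  | _ :: _, [], _, _ => []

def runList (low : List Char) (suf : List Nat) : List Nat :=
  match low, suf with
  | [], _ => []
  | c :: rest, sf :: sfs => sf :: runAux rest sfs c sf
  | _ :: _, [] => []

-- pass 3 body of Source B: one character, its lowered form, its run length
def emitChar (c lc : Char) (L : Nat) : Char :=
  let lc' := if lc ∈ pvVowels then pvVowels.getD ((L + pvVowels.idxOf lc + 1) % 5) ' ' else lc
  if PySem.Chars.isupper c then PySem.Chars.upperChar lc' else lc'

-- 'for c, lc, L in zip(s, low, runlen)'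
def emitAll : List Char → List Char → List Nat → List Char
  | c :: cs, lc :: lcs, L :: Ls => emitChar c lc L :: emitAll cs lcs Ls
  | _, _, _ => []

def shift_vowels_alt (s : String) : String :=
  let l := s.toList
  let low := l.map PySem.Chars.lowerChar   -- s.lower(), exact per-char on the ASCII domain
  let suf := sufList low
  let run := runList low suf
  String.mk (emitAll l low run)

-- ===== PRECONDITION & SPEC =====
def Spec_shift_vowels (s : String) (out : String) : Prop := out = shift_vowels_alt s
instance (s : String) (out : String) : Decidable (Spec_shift_vowels s out) := by unfold Spec_shift_vowels; infer_instance

-- ===== CLAIM (what is proved, stated in full; the proofs are below) =====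
def Claim_equal_shift_vowels : Prop := ∀ (s : String), Dom_shift_vowels s → Spec_shift_vowels s (shift_vowels s)

-- ===== LEMMAS AND PROOFS =====

-- proof-only helpers: the run ("groupby") view of the string, used to relate both ports

theorem pvDecDropWhile (p : Char → Bool) (c : Char) (rest : List Char) :
    (rest.dropWhile p).length < (c :: rest).length := by
  simp only [List.length_cons]
  exact Nat.lt_succ_of_le (List.length_dropWhile_le _ _)

def runsBy (l : List Char) : List (Char × List Char) :=
  match l with
  | [] => []
  | c :: rest =>
      (PySem.Chars.lowerChar c,
        c :: rest.takeWhile (fun d => PySem.Chars.lowerChar d == PySem.Chars.lowerChar c)) ::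
        runsBy (rest.dropWhile (fun d => PySem.Chars.lowerChar d == PySem.Chars.lowerChar c))
termination_by l.length
decreasing_by exact pvDecDropWhile _ c rest

def emitRun (p : Char × List Char) : List Char :=
  if p.1 ∈ pvVowels then
    let nv := pvVowels.getD ((p.2.length + pvVowels.idxOf p.1 + 1) % 5) ' '
    p.2.map (fun c => if PySem.Chars.isupper c then PySem.Chars.upperChar nv else nv)
  else
    p.2.map (fun c => if PySem.Chars.isupper c then PySem.Chars.upperChar c else PySem.Chars.lowerChar c)

-- A's output, run by run
def bOut (l : List Char) : List Char := ((runsBy l).map emitRun).flatten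

theorem toNat_ofNat_small (n : Nat) (h : n < 256) : (Char.ofNat n).toNat = n := by
  rw [Char.toNat_ofNat]
  have hv : n.isValidChar := by constructor; omega
  simp [hv]

theorem isupper_iff (c : Char) : PySem.Chars.isupper c = true ↔ 65 ≤ c.toNat ∧ c.toNat ≤ 90 := by
  simp only [PySem.Chars.isupper, Bool.and_eq_true, decide_eq_true_eq, Char.le_def,
    UInt32.le_iff_toNat_le, Char.toNat_val]
  rw [show 'A'.toNat = 65 from rfl, show 'Z'.toNat = 90 from rfl]

theorem islower_iff (c : Char) : PySem.Chars.islower c = true ↔ 97 ≤ c.toNat ∧ c.toNat ≤ 122 := by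
  simp only [PySem.Chars.islower, Bool.and_eq_true, decide_eq_true_eq, Char.le_def,
    UInt32.le_iff_toNat_le, Char.toNat_val]
  rw [show 'a'.toNat = 97 from rfl, show 'z'.toNat = 122 from rfl]

theorem lower_lower (c : Char) :
    PySem.Chars.lowerChar (PySem.Chars.lowerChar c) = PySem.Chars.lowerChar c := by
  unfold PySem.Chars.lowerChar
  by_cases h : PySem.Chars.isupper c = true
  · have hr := (isupper_iff c).1 h
    have ht : (Char.ofNat (c.toNat + 32)).toNat = c.toNat + 32 := toNat_ofNat_small _ (by omega)
    rw [if_pos h, if_neg]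
    rw [isupper_iff, ht]
    omega
  · simp [h]

theorem upper_lower (c : Char) :
    PySem.Chars.upperChar (PySem.Chars.lowerChar c) = PySem.Chars.upperChar c := by
  unfold PySem.Chars.lowerChar PySem.Chars.upperChar
  by_cases h : PySem.Chars.isupper c = true
  · have hr := (isupper_iff c).1 h
    have ht : (Char.ofNat (c.toNat + 32)).toNat = c.toNat + 32 := toNat_ofNat_small _ (by omega)
    rw [if_pos h, if_pos (by rw [islower_iff, ht]; omega), if_neg (by rw [islower_iff]; omega), ht]
    have h32 : c.toNat + 32 - 32 = c.toNat := by omega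
    rw [h32, Char.ofNat_toNat]
  · simp [h]

theorem drop_cons (l : List Char) (j : Nat) (h : j < l.length) :
    l.drop j = l.getD j ' ' :: l.drop (j + 1) := by
  rw [List.drop_eq_getElem_cons h, List.getD_eq_getElem l ' ' h]

-- the counting loop measures the current run
theorem crLoop_eq (l : List Char) (j count : Nat) (c : Char) (rest : List Char)
    (hd : l.drop j = c :: rest) :
    crLoop l j count =
      count + (rest.takeWhile (fun d => PySem.Chars.lowerChar d == PySem.Chars.lowerChar c)).length := by
  have hj : j < l.length := by
    by_contra hn
    push_neg at hn
    rw [List.drop_eq_nil_iff.2 (by omega)] at hd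
    cases hd
  have hc : l.getD j ' ' = c := by
    rw [drop_cons l j hj] at hd
    exact (List.cons.injEq _ _ _ _ ▸ hd).1
  have hrest : l.drop (j + 1) = rest := by
    rw [drop_cons l j hj] at hd
    exact (List.cons.injEq _ _ _ _ ▸ hd).2
  unfold crLoop
  by_cases h1 : j < l.length - 1
  · rw [dif_pos h1]
    have hj1 : j + 1 < l.length := by omega
    obtain ⟨d, t, hdt⟩ : ∃ d t, rest = d :: t := by
      rcases rest with _ | ⟨d, t⟩
      · exfalso
        have := congrArg List.length hrest
        simp [List.length_drop] at this
        omega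
      · exact ⟨d, t, rfl⟩
    have hgd : l.getD (j + 1) ' ' = d := by
      rw [drop_cons l (j + 1) hj1, hdt] at hrest
      exact (List.cons.injEq _ _ _ _ ▸ hrest).1
    by_cases h2 : (PySem.Chars.lowerChar (l.getD j ' ') == PySem.Chars.lowerChar (l.getD (j + 1) ' ')) = true
    · rw [if_pos h2]
      have hdc : PySem.Chars.lowerChar d = PySem.Chars.lowerChar c := by
        rw [hc, hgd] at h2
        exact (beq_iff_eq.1 h2).symm
      have ih := crLoop_eq l (j + 1) (count + 1) d t (by rw [hrest, hdt])
      rw [ih, hdt]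
      simp only [hdc, List.takeWhile_cons, hdc ▸ beq_self_eq_true (PySem.Chars.lowerChar c),
        if_pos]
      simp [hdc]
      omega
    · rw [if_neg h2]
      rw [hc, hgd] at h2
      have hne : (PySem.Chars.lowerChar d == PySem.Chars.lowerChar c) = false := by
        simp only [beq_eq_false_iff_ne, ne_eq]
        intro hx
        exact h2 (by simp [hx])
      rw [hdt]
      simp [List.takeWhile_cons, hne]
  · rw [dif_neg h1]
    have : rest = [] := by
      rw [← hrest, List.drop_eq_nil_iff]
      omega
    simp [this]
termination_by l.length - j

-- the inner emission loop appends the cased replacement vowel for each consumed char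
theorem emitLoop_eq (l : List Char) (nv : Char) (steps : Nat) : ∀ (j : Nat) (acc : List Char),
    j + steps ≤ l.length →
    emitLoop l j steps nv acc =
      acc ++ ((l.drop j).take steps).map (fun c => changeLetterCase nv (PySem.Chars.isupper c)) := by
  induction steps with
  | zero => intro j acc h; simp [emitLoop]
  | succ st ih =>
    intro j acc h
    have hj : j < l.length := by omega
    rw [emitLoop, ih (j + 1) _ (by omega), drop_cons l j hj]
    simp [List.append_assoc]

-- the replacement vowel is already lowercase
theorem lower_nv (m : Nat) :
    PySem.Chars.lowerChar (pvVowels.getD (m % 5) ' ') = pvVowels.getD (m % 5) ' ' := by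
  have h5 : m % 5 < 5 := Nat.mod_lt _ (by norm_num)
  set k := m % 5 with hk
  interval_cases k <;> decide

theorem takeWhile_len_le (p : Char → Bool) (l : List Char) :
    (l.takeWhile p).length ≤ l.length := by
  induction l with
  | nil => simp
  | cons a t ih => by_cases hp : p a <;> simp [List.takeWhile_cons, hp] <;> omega

theorem take_len_takeWhile (p : Char → Bool) (l : List Char) :
    l.take (l.takeWhile p).length = l.takeWhile p := by
  induction l with
  | nil => simp
  | cons a t ih => by_cases hp : p a <;> simp [List.takeWhile_cons, hp, ih]

theorem drop_len_takeWhile (p : Char → Bool) (l : List Char) :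
    l.drop (l.takeWhile p).length = l.dropWhile p := by
  induction l with
  | nil => simp
  | cons a t ih => by_cases hp : p a <;> simp [List.takeWhile_cons, List.dropWhile_cons, hp, ih]


-- B's run view consumes a non-vowel character one at a time
theorem bOut_nonvowel (c : Char) (rest : List Char)
    (hv : PySem.Chars.lowerChar c ∉ pvVowels) :
    bOut (c :: rest) =
      (if PySem.Chars.isupper c then PySem.Chars.upperChar c else PySem.Chars.lowerChar c) :: bOut rest := by
  have hstep : ∀ (r : List Char),
      bOut r = (r.takeWhile (fun d => PySem.Chars.lowerChar d == PySem.Chars.lowerChar c)).map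
          (fun x => if PySem.Chars.isupper x then PySem.Chars.upperChar x else PySem.Chars.lowerChar x)
        ++ bOut (r.dropWhile (fun d => PySem.Chars.lowerChar d == PySem.Chars.lowerChar c)) := by
    intro r
    rcases r with _ | ⟨d, t⟩
    · simp [bOut, runsBy]
    · by_cases hp : (PySem.Chars.lowerChar d == PySem.Chars.lowerChar c) = true
      · have hdc : PySem.Chars.lowerChar d = PySem.Chars.lowerChar c := beq_iff_eq.1 hp
        have hvd : PySem.Chars.lowerChar d ∉ pvVowels := by rw [hdc]; exact hv
        unfold bOut
        rw [runsBy]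
        simp only [List.map_cons, List.flatten_cons, emitRun, hdc]
        rw [if_neg hv]
        simp [List.takeWhile_cons, List.dropWhile_cons, hp, hdc, bOut]
      · simp [List.takeWhile_cons, List.dropWhile_cons, hp]
  rw [hstep (c :: rest)]
  simp only [List.takeWhile_cons, List.dropWhile_cons, beq_self_eq_true, if_true, List.map_cons]
  rw [hstep rest, List.cons_append]

-- main loop invariant: A's while-loop from position j produces acc ++ bOut(suffix from j)
theorem loopA_eq (n : Nat) (l : List Char) : ∀ (j : Nat) (acc : List Char),
    l.length - j ≤ n →
    loopA l j acc = acc ++ bOut (l.drop j) := by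
  induction n with
  | zero =>
    intro j acc h
    rw [loopA, dif_neg (by omega), List.drop_eq_nil_iff.2 (by omega)]
    simp [bOut, runsBy]
  | succ n ih =>
    intro j acc h
    rw [loopA]
    by_cases hj : j < l.length
    · rw [dif_pos hj]
      have hd := drop_cons l j hj
      have hlen : (l.drop (j + 1)).length = l.length - (j + 1) := List.length_drop ..
      by_cases hv : PySem.Chars.lowerChar (l.getD j ' ') ∈ pvVowels
      · simp only [hv, if_true]
        have hcr : count_repetition l j
            = 1 + ((l.drop (j + 1)).takeWhile
                (fun d => PySem.Chars.lowerChar d == PySem.Chars.lowerChar (l.getD j ' '))).length :=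
          crLoop_eq l j 1 _ _ hd
        have htwle : ((l.drop (j + 1)).takeWhile
            (fun d => PySem.Chars.lowerChar d == PySem.Chars.lowerChar (l.getD j ' '))).length
            ≤ (l.drop (j + 1)).length := takeWhile_len_le _ _
        have hbound : j + count_repetition l j ≤ l.length := by omega
        rw [emitLoop_eq l _ _ j acc hbound]
        rw [ih _ _ (by have h1 : 1 ≤ count_repetition l j := crLoop_ge l j 1; omega)]
        have htake : (l.drop j).take (count_repetition l j)
            = l.getD j ' ' :: (l.drop (j + 1)).takeWhile
                (fun d => PySem.Chars.lowerChar d == PySem.Chars.lowerChar (l.getD j ' ')) := by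
          rw [hd, hcr, Nat.add_comm 1 _, List.take_succ_cons]
          congr 1
          exact take_len_takeWhile _ _
        have hdrop : l.drop (j + count_repetition l j)
            = (l.drop (j + 1)).dropWhile
                (fun d => PySem.Chars.lowerChar d == PySem.Chars.lowerChar (l.getD j ' ')) := by
          rw [← List.drop_drop, hd, hcr, Nat.add_comm 1 _, List.drop_succ_cons]
          exact drop_len_takeWhile _ _
        rw [htake, hdrop]
        conv_rhs => rw [hd]
        unfold bOut
        rw [runsBy]
        simp only [List.map_cons, List.flatten_cons, emitRun, List.length_cons]
        rw [if_pos hv]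
        have hnveq : ((l.drop (j + 1)).takeWhile
              (fun d => PySem.Chars.lowerChar d == PySem.Chars.lowerChar (l.getD j ' '))).length + 1
            = count_repetition l j := by omega
        rw [hnveq]
        have hmap : ∀ (nvm : Nat) (run : List Char),
            run.map (fun x => changeLetterCase (pvVowels.getD (nvm % 5) ' ') (PySem.Chars.isupper x))
            = run.map (fun x => if PySem.Chars.isupper x = true
                then PySem.Chars.upperChar (pvVowels.getD (nvm % 5) ' ')
                else pvVowels.getD (nvm % 5) ' ') := by
          intro nvm run
          apply List.map_congr_left
          intro x _
          unfold changeLetterCase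
          by_cases hx : PySem.Chars.isupper x = true
          · rw [if_pos hx, if_pos hx]
          · rw [if_neg hx, if_neg hx, lower_nv]
        have hmap2 : ∀ (nvm : Nat) (a : Char) (run : List Char),
            changeLetterCase (pvVowels.getD (nvm % 5) ' ') (PySem.Chars.isupper a)
              :: run.map (fun x => changeLetterCase (pvVowels.getD (nvm % 5) ' ') (PySem.Chars.isupper x))
            = (if PySem.Chars.isupper a = true
                then PySem.Chars.upperChar (pvVowels.getD (nvm % 5) ' ')
                else pvVowels.getD (nvm % 5) ' ')
              :: run.map (fun x => if PySem.Chars.isupper x = true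
                then PySem.Chars.upperChar (pvVowels.getD (nvm % 5) ' ')
                else pvVowels.getD (nvm % 5) ' ') := by
          intro nvm a run
          have hthis := hmap nvm (a :: run)
          simp only [List.map_cons] at hthis
          exact hthis
        rw [hmap2 (count_repetition l j
            + pvVowels.idxOf (PySem.Chars.lowerChar (l.getD j ' ')) + 1)
            (l.getD j ' ')
            ((l.drop (j + 1)).takeWhile
              (fun d => PySem.Chars.lowerChar d == PySem.Chars.lowerChar (l.getD j ' ')))]
        simp [List.append_assoc, bOut]
      · simp only [hv, if_false]
        rw [ih _ _ (by omega)]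
        conv_rhs => rw [hd, bOut_nonvowel _ _ hv]
        have hcc : changeLetterCase (PySem.Chars.lowerChar (l.getD j ' '))
              (PySem.Chars.isupper (l.getD j ' '))
            = if PySem.Chars.isupper (l.getD j ' ')
                then PySem.Chars.upperChar (l.getD j ' ')
                else PySem.Chars.lowerChar (l.getD j ' ') := by
          unfold changeLetterCase
          by_cases hx : PySem.Chars.isupper (l.getD j ' ') = true
          · rw [if_pos hx, if_pos hx, upper_lower]
          · rw [if_neg hx, if_neg hx, lower_lower]
        rw [hcc]
        simp
    · rw [dif_neg hj, List.drop_eq_nil_iff.2 (by omega)]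
      simp [bOut, runsBy]

-- ===== bridging B's staged tables to the run view =====

-- descending list [n, n-1, …, 1]: the suffix table of one maximal run
def descL : Nat → List Nat
  | 0 => []
  | n + 1 => (n + 1) :: descL n

theorem descL_length (n : Nat) : (descL n).length = n := by
  induction n with
  | zero => rfl
  | succ n ih => simp [descL, ih]

theorem dropWhile_head_false (p : Char → Bool) (l : List Char) (e : Char) (t : List Char)
    (h : l.dropWhile p = e :: t) : p e = false := by
  induction l with
  | nil => cases h
  | cons a r ih =>
    by_cases hp : p a
    · rw [List.dropWhile_cons, if_pos hp] at h; exact ih h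
    · rw [List.dropWhile_cons, if_neg hp] at h
      cases h
      exact Bool.eq_false_iff.2 hp

-- pass 1 on one maximal run: the suffix values are L, L-1, …, 1
theorem sufList_run (k : Char) (t r : List Char) (ht : ∀ x ∈ t, x = k)
    (hr : ∀ e r', r = e :: r' → (e == k) = false) :
    sufList (k :: (t ++ r)) = descL (t.length + 1) ++ sufList r := by
  induction t with
  | nil =>
    rcases r with _ | ⟨e, r'⟩
    · rfl
    · have hek : (k == e) = false := by
        have := hr e r' rfl
        simp only [beq_eq_false_iff_ne, ne_eq] at this ⊢
        exact fun hx => this hx.symm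
      simp [sufList, hek, descL]
  | cons a t' ih =>
    have hak : a = k := ht a (by simp)
    subst hak
    have ih' := ih (fun x hx => ht x (by simp [hx]))
    simp only [List.cons_append, sufList, ih']
    have hhead : ((descL (t'.length + 1) ++ sufList r).headD 1) = t'.length + 1 := by
      simp [descL]
    simp [hhead, descL, List.length_cons]
  termination_by t.length

-- pass 2 skips along a constant run, copying the previous run length
theorem runAux_run (k : Char) (L : Nat) : ∀ (t : List Char) (sfs : List Nat)
    (rest : List Char) (rsfs : List Nat), t.length = sfs.length → (∀ x ∈ t, x = k) →
    runAux (t ++ rest) (sfs ++ rsfs) k L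
      = List.replicate t.length L ++ runAux rest rsfs k L := by
  intro t
  induction t with
  | nil => intro sfs rest rsfs hlen _; rcases sfs with _ | ⟨s, ss⟩ <;> simp_all
  | cons a t' ih =>
    intro sfs rest rsfs hlen ht
    rcases sfs with _ | ⟨s, ss⟩
    · simp at hlen
    · have hak : a = k := ht a (by simp)
      subst hak
      simp only [List.cons_append, runAux, beq_self_eq_true, if_true, List.replicate_succ]
      rw [ih ss rest rsfs (by simpa using hlen) (fun x hx => ht x (by simp [hx]))]
      simp [List.replicate_succ]

-- at a fresh run, the carried (char, runlen) pair is irrelevant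
theorem runAux_fresh (k : Char) (L : Nat) (rest : List Char) (rsfs : List Nat)
    (hr : ∀ e r', rest = e :: r' → (e == k) = false) :
    runAux rest rsfs k L = runList rest rsfs := by
  rcases rest with _ | ⟨e, r'⟩
  · rfl
  · rcases rsfs with _ | ⟨s, ss⟩
    · rfl
    · have he := hr e r' rfl
      simp [runAux, runList, he]

theorem sufList_length (l : List Char) : (sufList l).length = l.length := by
  match l with
  | [] => rfl
  | [_] => rfl
  | c :: d :: t =>
    have ih := sufList_length (d :: t)
    simp [sufList, ih]

-- pass 2 on one maximal run: every position gets the full run length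
theorem runList_run (k : Char) (t r : List Char) (ht : ∀ x ∈ t, x = k)
    (hr : ∀ e r', r = e :: r' → (e == k) = false) :
    runList (k :: (t ++ r)) (descL (t.length + 1) ++ sufList r)
      = List.replicate (t.length + 1) (t.length + 1) ++ runList r (sufList r) := by
  simp only [descL, List.cons_append, runList]
  rw [show descL t.length ++ sufList r = descL t.length ++ sufList r from rfl]
  have h1 : runAux (t ++ r) (descL t.length ++ sufList r) k (t.length + 1)
      = List.replicate t.length (t.length + 1) ++ runAux r (sufList r) k (t.length + 1) :=
    runAux_run k (t.length + 1) t (descL t.length) r (sufList r) (by rw [descL_length]) ht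
  rw [h1, runAux_fresh k (t.length + 1) r (sufList r) hr]
  simp only [List.replicate_succ, List.cons_append]
  generalize sufList r = sr
  cases r <;> cases sr <;> rfl

-- pass 3 over one run with constant key k and constant run length L
theorem emitAll_run (k : Char) (L : Nat) : ∀ (run : List Char) (rest : List Char)
    (lows : List Char) (Ls : List Nat), (∀ x ∈ run, PySem.Chars.lowerChar x = k) →
    emitAll (run ++ rest) (List.map PySem.Chars.lowerChar run ++ lows)
        (List.replicate run.length L ++ Ls)
      = run.map (fun x => emitChar x k L) ++ emitAll rest lows Ls := by
  intro run
  induction run with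
  | nil => intro rest lows Ls _; rfl
  | cons a r' ih =>
    intro rest lows Ls h
    have hak := h a (by simp)
    simp only [List.cons_append, List.map_cons, List.length_cons, List.replicate_succ,
      emitAll, hak]
    rw [ih rest lows Ls (fun x hx => h x (by simp [hx]))]

-- the per-character map with k and L = run length equals A's run emission
theorem map_emitChar_eq_emitRun (k : Char) (run : List Char)
    (h : ∀ x ∈ run, PySem.Chars.lowerChar x = k) :
    run.map (fun x => emitChar x k run.length) = emitRun (k, run) := by
  unfold emitRun emitChar
  by_cases hv : k ∈ pvVowels
  · simp only [hv, if_true]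
  · simp only [hv, if_false]
    apply List.map_congr_left
    intro x hx
    have hk := h x hx
    by_cases hu : PySem.Chars.isupper x = true
    · rw [if_pos hu, if_pos hu, ← hk, upper_lower]
    · rw [if_neg hu, if_neg hu, hk]

-- B's staged pipeline equals the run-by-run output
theorem emitAll_eq_bOut (n : Nat) : ∀ (l : List Char), l.length ≤ n →
    emitAll l (l.map PySem.Chars.lowerChar)
        (runList (l.map PySem.Chars.lowerChar) (sufList (l.map PySem.Chars.lowerChar)))
      = bOut l := by
  induction n with
  | zero =>
    intro l h
    have : l = [] := List.length_eq_zero_iff.1 (by omega)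
    subst this
    simp [bOut, runsBy, emitAll]
  | succ n ih =>
    intro l h
    rcases l with _ | ⟨c, rest⟩
    · simp [bOut, runsBy, emitAll]
    · have hsplit : rest
          = rest.takeWhile (fun d => PySem.Chars.lowerChar d == PySem.Chars.lowerChar c)
            ++ rest.dropWhile (fun d => PySem.Chars.lowerChar d == PySem.Chars.lowerChar c) :=
        (List.takeWhile_append_dropWhile).symm
      have hrun : ∀ x ∈ c :: rest.takeWhile
            (fun d => PySem.Chars.lowerChar d == PySem.Chars.lowerChar c),
          PySem.Chars.lowerChar x = PySem.Chars.lowerChar c := by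
        intro x hx
        rcases List.mem_cons.1 hx with h1 | h1
        · rw [h1]
        · have := List.mem_takeWhile_imp h1
          exact beq_iff_eq.1 this
      have htk : ∀ x ∈ List.map PySem.Chars.lowerChar
            (rest.takeWhile (fun d => PySem.Chars.lowerChar d == PySem.Chars.lowerChar c)),
          x = PySem.Chars.lowerChar c := by
        intro x hx
        obtain ⟨y, hy, rfl⟩ := List.mem_map.1 hx
        have := List.mem_takeWhile_imp hy
        exact beq_iff_eq.1 this
      have hfr : ∀ e r', List.map PySem.Chars.lowerChar
            (rest.dropWhile (fun d => PySem.Chars.lowerChar d == PySem.Chars.lowerChar c))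
            = e :: r' → (e == PySem.Chars.lowerChar c) = false := by
        intro e r' he
        rcases hl : rest.dropWhile (fun d => PySem.Chars.lowerChar d == PySem.Chars.lowerChar c)
          with _ | ⟨y, ys⟩
        · rw [hl] at he; cases he
        · rw [hl] at he
          simp only [List.map_cons, List.cons.injEq] at he
          rw [← he.1]
          exact dropWhile_head_false _ rest y ys hl
      have hs := sufList_run (PySem.Chars.lowerChar c) _ _ htk hfr
      have hrl := runList_run (PySem.Chars.lowerChar c) _ _ htk hfr
      have hmap : List.map PySem.Chars.lowerChar (c :: rest)
          = PySem.Chars.lowerChar c ::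
            (List.map PySem.Chars.lowerChar
              (rest.takeWhile (fun d => PySem.Chars.lowerChar d == PySem.Chars.lowerChar c))
            ++ List.map PySem.Chars.lowerChar
              (rest.dropWhile (fun d => PySem.Chars.lowerChar d == PySem.Chars.lowerChar c))) := by
        conv_lhs => rw [List.map_cons, hsplit]
        rw [List.map_append]
      -- split the three zipped lists at the end of the first run
      have hlen1 : (List.map PySem.Chars.lowerChar
          (rest.takeWhile (fun d => PySem.Chars.lowerChar d == PySem.Chars.lowerChar c))).length
          = (rest.takeWhile (fun d => PySem.Chars.lowerChar d == PySem.Chars.lowerChar c)).length :=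
        List.length_map ..
      rw [hlen1] at hs hrl
      rw [hmap, hs, hrl]
      have hE := emitAll_run (PySem.Chars.lowerChar c)
        ((rest.takeWhile (fun d => PySem.Chars.lowerChar d == PySem.Chars.lowerChar c)).length + 1)
        (c :: rest.takeWhile (fun d => PySem.Chars.lowerChar d == PySem.Chars.lowerChar c))
        (rest.dropWhile (fun d => PySem.Chars.lowerChar d == PySem.Chars.lowerChar c))
        (List.map PySem.Chars.lowerChar
          (rest.dropWhile (fun d => PySem.Chars.lowerChar d == PySem.Chars.lowerChar c)))
        (runList
          (List.map PySem.Chars.lowerChar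
            (rest.dropWhile (fun d => PySem.Chars.lowerChar d == PySem.Chars.lowerChar c)))
          (sufList (List.map PySem.Chars.lowerChar
            (rest.dropWhile (fun d => PySem.Chars.lowerChar d == PySem.Chars.lowerChar c)))))
        hrun
      have hshape : emitAll (c :: rest)
          (PySem.Chars.lowerChar c ::
            (List.map PySem.Chars.lowerChar
              (rest.takeWhile (fun d => PySem.Chars.lowerChar d == PySem.Chars.lowerChar c))
            ++ List.map PySem.Chars.lowerChar
              (rest.dropWhile (fun d => PySem.Chars.lowerChar d == PySem.Chars.lowerChar c))))
          (List.replicate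
            ((rest.takeWhile (fun d => PySem.Chars.lowerChar d == PySem.Chars.lowerChar c)).length
              + 1)
            ((rest.takeWhile (fun d => PySem.Chars.lowerChar d == PySem.Chars.lowerChar c)).length
              + 1)
            ++ runList
              (List.map PySem.Chars.lowerChar
                (rest.dropWhile (fun d => PySem.Chars.lowerChar d == PySem.Chars.lowerChar c)))
              (sufList (List.map PySem.Chars.lowerChar
                (rest.dropWhile (fun d => PySem.Chars.lowerChar d == PySem.Chars.lowerChar c)))))
          = (c :: rest.takeWhile (fun d => PySem.Chars.lowerChar d == PySem.Chars.lowerChar c)).map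
              (fun x => emitChar x (PySem.Chars.lowerChar c)
                ((rest.takeWhile
                  (fun d => PySem.Chars.lowerChar d == PySem.Chars.lowerChar c)).length + 1))
            ++ emitAll
              (rest.dropWhile (fun d => PySem.Chars.lowerChar d == PySem.Chars.lowerChar c))
              (List.map PySem.Chars.lowerChar
                (rest.dropWhile (fun d => PySem.Chars.lowerChar d == PySem.Chars.lowerChar c)))
              (runList
                (List.map PySem.Chars.lowerChar
                  (rest.dropWhile (fun d => PySem.Chars.lowerChar d == PySem.Chars.lowerChar c)))
                (sufList (List.map PySem.Chars.lowerChar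
                  (rest.dropWhile
                    (fun d => PySem.Chars.lowerChar d == PySem.Chars.lowerChar c))))) := by
        conv_lhs => rw [show (c :: rest) = (c :: rest.takeWhile
          (fun d => PySem.Chars.lowerChar d == PySem.Chars.lowerChar c))
          ++ rest.dropWhile (fun d => PySem.Chars.lowerChar d == PySem.Chars.lowerChar c) from by
            rw [List.cons_append, ← hsplit]]
        simpa [hlen1] using hE
      rw [hshape]
      have hd : (rest.dropWhile
          (fun d => PySem.Chars.lowerChar d == PySem.Chars.lowerChar c)).length ≤ n := by
        have := List.length_dropWhile_le
          (fun d => PySem.Chars.lowerChar d == PySem.Chars.lowerChar c) rest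
        simp only [List.length_cons] at h
        omega
      rw [ih _ hd]
      have hrhs : bOut (c :: rest)
          = emitRun (PySem.Chars.lowerChar c,
              c :: rest.takeWhile (fun d => PySem.Chars.lowerChar d == PySem.Chars.lowerChar c))
            ++ bOut (rest.dropWhile
              (fun d => PySem.Chars.lowerChar d == PySem.Chars.lowerChar c)) := by
        unfold bOut
        rw [runsBy]
        simp
      rw [hrhs, ← map_emitChar_eq_emitRun (PySem.Chars.lowerChar c) _ hrun]
      simp

-- ===== VERDICT (by name: the statement is the Claim_ definition above) =====
theorem shift_vowels_spec : Claim_equal_shift_vowels := by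
  intro s _
  unfold Spec_shift_vowels shift_vowels shift_vowels_alt
  have hA := loopA_eq s.toList.length s.toList 0 [] (by omega)
  simp only [List.drop_zero, List.nil_append] at hA
  have hB := emitAll_eq_bOut s.toList.length s.toList (by omega)
  rw [hA, ← hB]
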